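-- pv_equiv track=rewrite | github.com/JamesMcCullochDickens/Machine-Learning-Project | Preprocess2.py | remove_features
-- ===== SOURCE A (Python) =====
-- num_attributes = 42
--
-- def remove_features(data, features_indices):
--     array_without_feature = []
--     for i in range(0, len(data)):
--         temp = []
--         for j in range(0, num_attributes):
--             if j in features_indices:
--                 temp.append(data[i][j])
--         array_without_feature.append(temp)
--     return array_without_feature
-- ===== SOURCE B (Python) =====
-- num_attributes = 42
--
-- def remove_features(data, features_indices):
--     valid = sorted(j for j in set(features_indices) if 0 <= j < num_attributes)
--     return [[row[j] for j in valid] for row in data]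
-- ===== Notes on version B (the rewrite author's own statement) =====
-- stated objective: faster
-- what changed: B precomputes once the sorted deduplicated in-range list of kept column indices and projects each row directly over it, instead of A's per-row scan of all 42 columns with an O(m) list-membership test per column.
import Mathlib
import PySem

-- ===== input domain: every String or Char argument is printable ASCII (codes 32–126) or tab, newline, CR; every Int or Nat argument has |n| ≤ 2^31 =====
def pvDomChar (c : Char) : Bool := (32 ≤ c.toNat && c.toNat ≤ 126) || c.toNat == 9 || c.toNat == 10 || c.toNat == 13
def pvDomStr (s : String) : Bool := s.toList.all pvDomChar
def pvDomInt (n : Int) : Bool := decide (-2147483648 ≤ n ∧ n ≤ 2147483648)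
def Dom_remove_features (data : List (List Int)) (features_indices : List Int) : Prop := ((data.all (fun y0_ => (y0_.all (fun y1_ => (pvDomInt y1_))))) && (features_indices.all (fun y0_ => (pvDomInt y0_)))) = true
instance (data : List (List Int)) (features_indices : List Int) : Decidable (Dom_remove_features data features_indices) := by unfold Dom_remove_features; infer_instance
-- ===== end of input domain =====

-- B keeps the same selection as A but precomputes the sorted deduplicated in-range index list once
-- and projects each row over it; equal return value on Pre_ (rows long enough for every kept index).

-- ===== PORT A =====
def remove_features (data : List (List Int)) (features_indices : List Int) : List (List Int) :=
  (PySem.List.pyRange 0 data.length 1).foldl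
    (fun array_without_feature i =>
      array_without_feature ++
        [ (PySem.List.pyRange 0 42 1).foldl
            (fun temp j =>
              if features_indices.contains j then
                temp ++ [PySem.List.pyGetD (PySem.List.pyGetD data i []) j 0]
              else temp) [] ]) []

-- ===== PORT B =====
def remove_features_alt (data : List (List Int)) (features_indices : List Int) : List (List Int) :=
  let valid : List Int :=
    PySem.List.sorted
      (PySem.Set.ofList (features_indices.filter (fun j => decide (0 ≤ j) && decide (j < 42))))
      (fun x => x) false
  data.map (fun row => valid.map (fun j => PySem.List.pyGetD row j 0))

-- ===== PRECONDITION & SPEC =====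
-- Pre_ excludes exactly the inputs where Python A raises IndexError: a row shorter than some kept in-range index.
def Pre_remove_features (data : List (List Int)) (features_indices : List Int) : Prop :=
  ∀ row ∈ data, ∀ j ∈ features_indices, 0 ≤ j → j < 42 → j < (row.length : Int)
instance (data : List (List Int)) (features_indices : List Int) : Decidable (Pre_remove_features data features_indices) := by unfold Pre_remove_features; infer_instance

def pvWitness_remove_features : List (List Int) × List Int :=
  ([[1,2,3], [4,5,6]], [2, 0, 2, 45, -1])

def Spec_remove_features (data : List (List Int)) (features_indices : List Int) (out : List (List Int)) : Prop := out = remove_features_alt data features_indices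
instance (data : List (List Int)) (features_indices : List Int) (out : List (List Int)) : Decidable (Spec_remove_features data features_indices out) := by unfold Spec_remove_features; infer_instance

-- ===== CLAIM (what is proved, stated in full; the proofs are below) =====
def Claim_equal_remove_features : Prop := ∀ (data : List (List Int)) (features_indices : List Int), Dom_remove_features data features_indices → Pre_remove_features data features_indices → Spec_remove_features data features_indices (remove_features data features_indices)

-- ===== LEMMAS AND PROOFS =====

-- The valid-index list B precomputes is exactly the in-order filter of 0..41 that A's loop keeps.
theorem valid_eq (fi : List Int) :
    PySem.List.sorted
      (PySem.Set.ofList (fi.filter (fun j => decide (0 ≤ j) && decide (j < 42))))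
      (fun x => x) false
      = (PySem.List.pyRange 0 42 1).filter (fun j => fi.contains j) := by
  apply PySem.List.sorted_eq_of_perm_of_pairwise_lt
  · apply (List.perm_ext_iff_of_nodup ?_ ?_).mpr
    · intro a
      simp [PySem.Set.mem_ofList, List.mem_filter, PySem.List.mem_pyRange_one]
      tauto
    · exact (PySem.List.nodup_pyRange_one 0 42).filter _
    · exact PySem.Set.nodup_ofList _
  · exact (PySem.List.pairwise_lt_pyRange_one 0 42).filter _

theorem remove_features_spec' (data : List (List Int)) (fi : List Int) :
    remove_features data fi = remove_features_alt data fi := by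
  unfold remove_features remove_features_alt
  simp only [valid_eq]
  rw [PySem.List.foldl_pyRange_zero_pyGetD' data [] (fun acc row =>
    acc ++ [ (PySem.List.pyRange 0 42 1).foldl
            (fun temp j =>
              if fi.contains j then temp ++ [PySem.List.pyGetD row j 0] else temp) [] ]) []]
  rw [PySem.List.foldl_append_singleton_eq_map]
  apply List.map_congr_left
  intro row _
  rw [PySem.List.foldl_append_if]
  simp only [List.nil_append]

-- ===== VERDICT (by name: the statement is the Claim_ definition above) =====
theorem remove_features_spec : Claim_equal_remove_features := by
  intro data fi _ _
  exact remove_features_spec' data fi
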